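-- pv_equiv track=rewrite | github.com/yassine-ramla/my_leetcode_solutions | python/1480. Running Sum of 1d Array/solution.py | runningSum1
-- ===== SOURCE A (Python) =====
-- from typing import List
--
-- def runningSum1(nums: List[int]) -> List[int]:
--   result = []
--   for i in range(len(nums)):
--     sum = 0
--     for j in range(i + 1):
--       sum += nums[j]
--     result.append(sum)
--   return result
-- ===== SOURCE B (Python) =====
-- from typing import List
--
-- def runningSum1(nums: List[int]) -> List[int]:
--   out = []
--   s = 0
--   for x in nums:
--     s += x
--     out.append(s)
--   return out
-- ===== Notes on version B (the rewrite author's own statement) =====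
-- stated objective: faster
-- what changed: Replaces the quadratic re-summation of every prefix (inner loop per index) by a single pass that carries a running accumulator.
import Mathlib
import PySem

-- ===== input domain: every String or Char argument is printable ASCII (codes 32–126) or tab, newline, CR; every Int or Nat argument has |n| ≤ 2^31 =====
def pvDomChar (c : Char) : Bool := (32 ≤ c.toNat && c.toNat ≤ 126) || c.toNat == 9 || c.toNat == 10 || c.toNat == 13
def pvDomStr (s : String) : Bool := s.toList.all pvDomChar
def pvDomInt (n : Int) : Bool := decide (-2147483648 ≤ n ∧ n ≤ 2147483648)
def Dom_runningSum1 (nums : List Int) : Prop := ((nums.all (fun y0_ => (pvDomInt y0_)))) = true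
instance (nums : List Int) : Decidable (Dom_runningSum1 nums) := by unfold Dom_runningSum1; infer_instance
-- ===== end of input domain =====

-- B replaces A's quadratic re-summation of each prefix by one pass with a running accumulator.

-- ===== PORT A =====
-- for i in range(len(nums)): sum = 0; for j in range(i+1): sum += nums[j]; result.append(sum)
def runningSum1 (nums : List Int) : List Int :=
  (PySem.List.pyRange 0 (nums.length : Int) 1).foldl
    (fun result i =>
      result ++ [(PySem.List.pyRange 0 (i + 1) 1).foldl
        (fun s j => s + PySem.List.pyGetD nums j 0) 0])
    []

-- ===== PORT B =====
-- out = []; s = 0; for x in nums: s += x; out.append(s)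
def runningSum1_alt (nums : List Int) : List Int :=
  (nums.foldl (fun (st : Int × List Int) x => (st.1 + x, st.2 ++ [st.1 + x])) (0, [])).2

-- ===== PRECONDITION & SPEC =====
def Spec_runningSum1 (nums : List Int) (out : List Int) : Prop := out = runningSum1_alt nums
instance (nums : List Int) (out : List Int) : Decidable (Spec_runningSum1 nums out) := by unfold Spec_runningSum1; infer_instance

-- ===== CLAIM =====
def Claim_equal_runningSum1 : Prop := ∀ (nums : List Int), Dom_runningSum1 nums → Spec_runningSum1 nums (runningSum1 nums)

-- ===== LEMMAS AND PROOFS =====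

-- A's inner loop sums the first n elements.
lemma innerSum_eq_take (nums : List Int) (n : Nat) (hn : n ≤ nums.length) :
    (PySem.List.pyRange 0 (n : Int) 1).foldl (fun s j => s + PySem.List.pyGetD nums j 0) 0
      = (nums.take n).sum := by
  induction n with
  | zero => simp
  | succ k ih =>
      have hk : k ≤ nums.length := Nat.le_of_succ_le hn
      have hsplit : PySem.List.pyRange 0 ((k : Int) + 1) 1
          = PySem.List.pyRange 0 (k : Int) 1 ++ [(k : Int)] :=
        PySem.List.pyRange_one_succ_right (by positivity)
      have hcast : ((k + 1 : Nat) : Int) = (k : Int) + 1 := by push_cast; ring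
      rw [hcast, hsplit, List.foldl_append, ih hk]
      simp only [List.foldl_cons, List.foldl_nil]
      rw [PySem.List.pyGetD_eq_getElem nums 0 (by positivity) (by exact_mod_cast hn)]
      rw [List.sum_take_succ nums k (by omega)]
      simp

-- A's outer loop appends one element per index.
lemma foldl_append_map {α β : Type} (l : List α) (g : α → β) (acc : List β) :
    l.foldl (fun r i => r ++ [g i]) acc = acc ++ l.map g := by
  induction l generalizing acc with
  | nil => simp
  | cons x xs ih => simp [ih]

-- A computes the prefix sums as a map over indices.
lemma runningSum1_eq_map (nums : List Int) :
    runningSum1 nums = (List.range nums.length).map (fun k => (nums.take (k + 1)).sum) := by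
  unfold runningSum1
  rw [foldl_append_map]
  rw [PySem.List.pyRange_one]
  simp only [List.map_map, List.nil_append, Int.sub_zero, Int.toNat_natCast]
  apply List.map_congr_left
  intro k hk
  simp only [Function.comp]
  have : ((0 : Int) + (k : Int)) + 1 = ((k + 1 : Nat) : Int) := by push_cast; ring
  rw [zero_add]
  have hcast : (k : Int) + 1 = ((k + 1 : Nat) : Int) := by push_cast; ring
  rw [hcast, innerSum_eq_take nums (k + 1) (by simpa using List.mem_range.mp hk)]

-- B's fold, with general accumulator state.
lemma foldB_eq_map (nums : List Int) (s : Int) (out : List Int) :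
    (nums.foldl (fun (st : Int × List Int) x => (st.1 + x, st.2 ++ [st.1 + x])) (s, out)).2
      = out ++ (List.range nums.length).map (fun k => s + (nums.take (k + 1)).sum) := by
  induction nums generalizing s out with
  | nil => simp
  | cons x xs ih =>
      simp only [List.foldl_cons]
      rw [ih (s + x) (out ++ [s + x])]
      rw [List.length_cons, List.range_succ_eq_map]
      simp [List.map_map, Function.comp, add_assoc, List.append_assoc]

lemma runningSum1_alt_eq_map (nums : List Int) :
    runningSum1_alt nums = (List.range nums.length).map (fun k => (nums.take (k + 1)).sum) := by
  unfold runningSum1_alt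
  rw [foldB_eq_map]
  simp

-- ===== VERDICT =====
theorem runningSum1_spec : Claim_equal_runningSum1 := by
  intro nums _
  unfold Spec_runningSum1
  rw [runningSum1_eq_map, runningSum1_alt_eq_map]
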